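-- pv_equiv track=rewrite | github.com/ThomasBahen/SpellingBee | spelling_bee.py | load_answers
-- ===== SOURCE A (Python) =====
-- MINIMUM_WORD_SIZE=5
--
-- def load_answers(letters,valid_words):
--     answers = []
--     valid_words = [w for w in valid_words if not w.strip(letters)]
--     threes = [w for w in valid_words if all(l in w for l in list(letters))]
--     answers.append(threes)
--     non_threes = [w for w in valid_words if w not in threes and (len(w)>MINIMUM_WORD_SIZE-1 and letters[0] in w)]
--     answers.append(non_threes)
--     return answers
-- ===== SOURCE B (Python) =====
-- MINIMUM_WORD_SIZE = 5
--
-- def load_answers(letters, valid_words):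
--     threes = []
--     non_threes = []
--     for w in valid_words:
--         if w.strip(letters):
--             continue
--         if all(l in w for l in letters):
--             threes.append(w)
--         elif len(w) >= MINIMUM_WORD_SIZE and letters[0] in w:
--             non_threes.append(w)
--     return [threes, non_threes]
-- ===== Notes on version B (the rewrite author's own statement) =====
-- stated objective: faster
-- what changed: One classifying pass over valid_words (strip-validity, pangram test, else the length/first-letter test) replacing A's three list comprehensions, eliminating in particular the 'w not in threes' linear membership rescan of the threes list inside the non_threes comprehension.
import Mathlib
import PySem

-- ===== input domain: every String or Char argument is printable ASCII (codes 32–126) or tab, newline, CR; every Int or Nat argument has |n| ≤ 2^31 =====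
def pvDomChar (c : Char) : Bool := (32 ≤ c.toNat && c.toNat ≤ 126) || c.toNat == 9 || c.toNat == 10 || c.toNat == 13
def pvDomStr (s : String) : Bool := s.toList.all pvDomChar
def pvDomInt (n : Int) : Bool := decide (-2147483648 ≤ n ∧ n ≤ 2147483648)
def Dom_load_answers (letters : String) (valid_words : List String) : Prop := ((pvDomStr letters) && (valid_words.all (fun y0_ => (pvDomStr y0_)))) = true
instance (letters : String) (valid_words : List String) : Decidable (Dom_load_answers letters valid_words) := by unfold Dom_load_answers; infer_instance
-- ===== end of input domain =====

-- B replaces A's three comprehensions (and the 'w not in threes' rescan) with one classifying pass; return value proved equal.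

-- shared Python sub-expressions (identical source text in A and B):
-- "not w.strip(letters)"
def pvValid (letters w : String) : Bool := (PySem.Str.stripChars w letters).toList.isEmpty
-- "all(l in w for l in letters)"  (each l a 1-char string; 'l in w' = substring test)
def pvPangram (letters w : String) : Bool := letters.toList.all (fun l => PySem.Chars.isIn [l] w.toList)
-- "letters[0] in w": letters[0] raises IndexError on empty letters; the Python only ever
-- evaluates it after the other conjuncts, where letters is provably nonempty, so the
-- none branch (false) is unreachable in both ports.
def pvFirstIn (letters w : String) : Bool := (PySem.Str.pyGet? letters 0).any (fun c => PySem.Chars.isIn [c] w.toList)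

-- ===== PORT A =====
def load_answers (letters : String) (valid_words : List String) : List (List String) :=
  let valid := valid_words.filter (fun w => pvValid letters w)
  let threes := valid.filter (fun w => pvPangram letters w)
  let non_threes := valid.filter (fun w =>
    !threes.contains w && (decide (5 ≤ w.toList.length) && pvFirstIn letters w))
  [threes, non_threes]

-- ===== PORT B =====
-- the body of B's single loop over valid_words
def pvStep (letters : String) (acc : List String × List String) (w : String) : List String × List String :=
  if !pvValid letters w then acc
  else if pvPangram letters w then (acc.1 ++ [w], acc.2)
  else if decide (5 ≤ w.toList.length) && pvFirstIn letters w then (acc.1, acc.2 ++ [w])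
  else acc

def load_answers_alt (letters : String) (valid_words : List String) : List (List String) :=
  let acc := valid_words.foldl (pvStep letters) ([], [])
  [acc.1, acc.2]

-- ===== PRECONDITION & SPEC =====
def Spec_load_answers (letters : String) (valid_words : List String) (out : List (List String)) : Prop := out = load_answers_alt letters valid_words
instance (letters : String) (valid_words : List String) (out : List (List String)) : Decidable (Spec_load_answers letters valid_words out) := by unfold Spec_load_answers; infer_instance

-- ===== CLAIM (what is proved, stated in full; the proofs are below) =====
def Claim_equal_load_answers : Prop := ∀ (letters : String) (valid_words : List String), Dom_load_answers letters valid_words → Spec_load_answers letters valid_words (load_answers letters valid_words)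

-- ===== LEMMAS AND PROOFS =====

-- B's fold returns the two filters of the input list, appended to the accumulator.
theorem alt_fold_eq (letters : String) (l : List String) (acc : List String × List String) :
    l.foldl (pvStep letters) acc
    = (acc.1 ++ l.filter (fun w => pvValid letters w && pvPangram letters w),
       acc.2 ++ l.filter (fun w => pvValid letters w && !pvPangram letters w
                                   && (decide (5 ≤ w.toList.length) && pvFirstIn letters w))) := by
  induction l generalizing acc with
  | nil => simp
  | cons w t ih =>
    rw [List.foldl_cons, List.filter_cons, List.filter_cons]
    cases hv : pvValid letters w with
    | false =>
      have hs : pvStep letters acc w = acc := by unfold pvStep; rw [hv]; simp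
      rw [hs, ih]; simp
    | true =>
      cases hp : pvPangram letters w with
      | true =>
        have hs : pvStep letters acc w = (acc.1 ++ [w], acc.2) := by
          unfold pvStep; rw [hv, hp]; simp
        rw [hs, ih]; simp
      | false =>
        cases hq : (decide (5 ≤ w.toList.length) && pvFirstIn letters w) with
        | true =>
          have hs : pvStep letters acc w = (acc.1, acc.2 ++ [w]) := by
            unfold pvStep; rw [hv, hp, hq]; simp
          rw [hs, ih]; simp
        | false =>
          have hs : pvStep letters acc w = acc := by
            unfold pvStep; rw [hv, hp, hq]; simp
          rw [hs, ih]; simp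

theorem load_answers_eq_alt (letters : String) (valid_words : List String) :
    load_answers letters valid_words = load_answers_alt letters valid_words := by
  unfold load_answers load_answers_alt
  rw [alt_fold_eq]
  simp only [List.nil_append]
  have hthrees :
      (valid_words.filter (fun w => pvValid letters w)).filter (fun w => pvPangram letters w)
      = valid_words.filter (fun w => pvValid letters w && pvPangram letters w) := by
    rw [List.filter_filter]
    apply List.filter_congr
    intro a _
    exact Bool.and_comm _ _
  refine congrArg₂ (fun a b => [a, b]) hthrees ?_
  have hB : valid_words.filter (fun w => pvValid letters w && !pvPangram letters w
              && (decide (5 ≤ w.toList.length) && pvFirstIn letters w))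
      = (valid_words.filter (fun w => pvValid letters w)).filter
          (fun w => !pvPangram letters w && (decide (5 ≤ w.toList.length) && pvFirstIn letters w)) := by
    rw [List.filter_filter]
    apply List.filter_congr
    intro w _
    cases pvValid letters w <;> cases pvPangram letters w <;> simp
  rw [hB]
  apply List.filter_congr
  intro w hw
  obtain ⟨hw1, hw2⟩ := List.mem_filter.mp hw
  have hc : ((valid_words.filter (fun w => pvValid letters w)).filter
      (fun w => pvPangram letters w)).contains w = pvPangram letters w := by
    cases hpb : pvPangram letters w
    · simp [List.mem_filter, hpb]
    · simp [List.mem_filter, hw1, hw2, hpb]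
  rw [hc]

theorem load_answers_spec : Claim_equal_load_answers := by
  intro letters valid_words _
  exact load_answers_eq_alt letters valid_words
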